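-- pv_equiv track=rewrite | github.com/andyscoffee/Study | 이코테/Ch7.BinarySearch/prac7-2.py | cutter
-- ===== SOURCE A (Python) =====
-- def cutter(array, target, start, end):
--     res = 0
--
--     while start <= end:
--         total = 0
--         mid = (start + end) // 2
--
--         for i in array:
--             if i > mid:  # 떡이 칼보다 더 긴 경우에만 자름(total에 더해줌)
--                 total += i - mid
--         if total == target:
--             return mid
--         elif total < target:
--             end = mid - 1
--         else:
--             start = mid + 1
--             res = mid
--     return res
-- ===== SOURCE B (Python) =====
-- def cutter(array, target, start, end):
--     # sort once + prefix sums; each probe reads its total via binary search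
--     srt = sorted(array)
--     n = len(srt)
--     pref = [0]
--     acc = 0
--     for v in srt:
--         acc += v
--         pref.append(acc)
--     res = 0
--     while start <= end:
--         mid = (start + end) // 2
--         # lo = first index with srt[lo] > mid  (hand-rolled bisect_right)
--         lo, hi = 0, n
--         while lo < hi:
--             m = (lo + hi) // 2
--             if mid < srt[m]:
--                 hi = m
--             else:
--                 lo = m + 1
--         total = (pref[n] - pref[lo]) - (n - lo) * mid
--         if total == target:
--             return mid
--         if total < target:
--             end = mid - 1
--         else:
--             start = mid + 1
--             res = mid
--     return res
-- ===== Notes on version B (the rewrite author's own statement) =====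
-- stated objective: alternative
-- what changed: B sorts the array once and builds prefix sums, then computes each probe's removed total with a binary search on the sorted array instead of rescanning all elements per midpoint; it trades an O(n log n) preprocessing pass for O(log n) work per probe.
import Mathlib
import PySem

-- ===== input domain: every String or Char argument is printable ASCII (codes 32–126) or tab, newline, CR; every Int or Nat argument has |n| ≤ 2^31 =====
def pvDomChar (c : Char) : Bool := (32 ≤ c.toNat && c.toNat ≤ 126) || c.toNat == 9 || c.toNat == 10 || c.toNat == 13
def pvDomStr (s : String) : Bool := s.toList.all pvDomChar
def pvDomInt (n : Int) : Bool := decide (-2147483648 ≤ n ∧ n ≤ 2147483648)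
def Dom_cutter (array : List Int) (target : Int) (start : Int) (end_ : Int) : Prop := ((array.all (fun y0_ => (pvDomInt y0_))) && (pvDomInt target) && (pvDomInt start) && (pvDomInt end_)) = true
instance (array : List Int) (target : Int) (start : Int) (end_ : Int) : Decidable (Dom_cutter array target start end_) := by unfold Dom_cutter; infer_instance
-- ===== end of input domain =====

-- B replaces A's per-midpoint rescan of the whole array by one sort + prefix sums +
-- a binary search per midpoint (objective: alternative algorithm; it trades an upfront
-- sort for O(log n) work per probe).

-- ===== PORT A =====
def cutterLoop (array : List Int) (target start end_ res : Int) : Int :=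
  if h : start ≤ end_ then
    let mid := PySem.Int.floordiv (start + end_) 2
    let total := array.foldl (fun total i => if i > mid then total + (i - mid) else total) 0
    if total = target then mid
    else if total < target then cutterLoop array target start (mid - 1) res
    else cutterLoop array target (mid + 1) end_ mid
  else res
termination_by (end_ - start + 1).toNat
decreasing_by
  all_goals
    have hb := PySem.Int.floordiv_two_mid_bounds (lo := start) (hi := end_) h
    omega

def cutter (array : List Int) (target : Int) (start : Int) (end_ : Int) : Int :=
  cutterLoop array target start end_ 0

-- ===== PORT B =====
-- hand-rolled bisect_right loop of Source B: first index with srt[index] > mid, searched on [lo,hi)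
def bsLoop (srt : List Int) (mid : Int) (lo hi : Int) : Int :=
  if h : lo < hi then
    let m := PySem.Int.floordiv (lo + hi) 2
    -- srt[m] is always in range here (0 ≤ lo ≤ m < hi ≤ len); pyGetD only makes the lookup total
    if mid < PySem.List.pyGetD srt m 0 then bsLoop srt mid lo m
    else bsLoop srt mid (m + 1) hi
  else lo
termination_by (hi - lo).toNat
decreasing_by
  all_goals
    have h1 := (PySem.Int.le_floordiv_iff_mul_le (a := lo + hi) (b := 2) (q := lo) (by omega)).mpr (by omega)
    have h2 := (PySem.Int.floordiv_lt_iff_lt_mul (a := lo + hi) (b := 2) (q := hi) (by omega)).mpr (by omega)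
    omega

-- the prefix-sum building loop of Source B (state: pref list so far, running acc)
def prefAcc (srt : List Int) : List Int × Int :=
  srt.foldl (fun st v => (st.1 ++ [st.2 + v], st.2 + v)) ([0], 0)

def cutterAltLoop (srt pref : List Int) (n target start end_ res : Int) : Int :=
  if h : start ≤ end_ then
    let mid := PySem.Int.floordiv (start + end_) 2
    let lo := bsLoop srt mid 0 n
    let total := (PySem.List.pyGetD pref n 0 - PySem.List.pyGetD pref lo 0) - (n - lo) * mid
    if total = target then mid
    else if total < target then cutterAltLoop srt pref n target start (mid - 1) res
    else cutterAltLoop srt pref n target (mid + 1) end_ mid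
  else res
termination_by (end_ - start + 1).toNat
decreasing_by
  all_goals
    have hb := PySem.Int.floordiv_two_mid_bounds (lo := start) (hi := end_) h
    omega

def cutter_alt (array : List Int) (target : Int) (start : Int) (end_ : Int) : Int :=
  let srt := PySem.List.sorted array (fun x => x) false
  let n : Int := srt.length
  let pref := (prefAcc srt).1
  cutterAltLoop srt pref n target start end_ 0

-- ===== PRECONDITION & SPEC =====
def Spec_cutter (array : List Int) (target : Int) (start : Int) (end_ : Int) (out : Int) : Prop := out = cutter_alt array target start end_
instance (array : List Int) (target : Int) (start : Int) (end_ : Int) (out : Int) : Decidable (Spec_cutter array target start end_ out) := by unfold Spec_cutter; infer_instance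

-- ===== CLAIM (what is proved, stated in full; the proofs are below) =====
def Claim_equal_cutter : Prop := ∀ (array : List Int) (target : Int) (start : Int) (end_ : Int), Dom_cutter array target start end_ → Spec_cutter array target start end_ (cutter array target start end_)

-- ===== LEMMAS AND PROOFS =====

-- bsLoop finds the partition point of a sorted list
theorem bsLoop_partition (srt : List Int) (mid : Int)
    (hs : srt.Pairwise (· ≤ ·)) :
    ∀ (fuel : Nat) (lo hi : Int), (hi - lo).toNat ≤ fuel →
    0 ≤ lo → lo ≤ hi → hi ≤ srt.length →
    (∀ (j : Nat) (hj : j < srt.length), (j : Int) < lo → srt[j] ≤ mid) →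
    (∀ (j : Nat) (hj : j < srt.length), hi ≤ (j : Int) → mid < srt[j]) →
    ∃ k : Nat, bsLoop srt mid lo hi = (k : Int) ∧ k ≤ srt.length ∧
      (∀ (j : Nat) (hj : j < srt.length), j < k → srt[j] ≤ mid) ∧
      (∀ (j : Nat) (hj : j < srt.length), k ≤ j → mid < srt[j]) := by
  have hmono := List.pairwise_iff_getElem.mp hs
  intro fuel
  induction fuel with
  | zero =>
    intro lo hi hf h0 hlh hhn hlt hge
    have hlo : lo = hi := by omega
    refine ⟨lo.toNat, ?_, by omega, ?_, ?_⟩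
    · rw [bsLoop]; simp [hlo]; omega
    · intro j hj hjk; exact hlt j hj (by omega)
    · intro j hj hjk; exact hge j hj (by omega)
  | succ fuel ih =>
    intro lo hi hf h0 hlh hhn hlt hge
    rw [bsLoop]
    by_cases h : lo < hi
    · simp only [h, dif_pos]
      have h1 := (PySem.Int.le_floordiv_iff_mul_le (a := lo + hi) (b := 2) (q := lo) (by omega)).mpr (by omega)
      have h2 := (PySem.Int.floordiv_lt_iff_lt_mul (a := lo + hi) (b := 2) (q := hi) (by omega)).mpr (by omega)
      set m := PySem.Int.floordiv (lo + hi) 2 with hm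
      have hmrange : m.toNat < srt.length := by omega
      have hget : PySem.List.pyGetD srt m 0 = srt[m.toNat] := by
        have hmn : m = ((m.toNat : Nat) : Int) := by omega
        calc PySem.List.pyGetD srt m 0 = PySem.List.pyGetD srt ((m.toNat : Nat) : Int) 0 := by rw [← hmn]
          _ = srt.getD m.toNat 0 := PySem.List.pyGetD_natCast _ _ _
          _ = srt[m.toNat] := List.getD_eq_getElem _ _ hmrange
      by_cases hc : mid < PySem.List.pyGetD srt m 0
      · simp only [hc, if_pos]
        apply ih lo m (by omega) h0 (by omega) (by omega) hlt
        intro j hj hmj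
        rcases lt_or_ge j m.toNat with hjm | hjm
        · omega
        rcases Nat.eq_or_lt_of_le hjm with hjm' | hjm'
        · rw [hget] at hc; simp only [← hjm']; exact hc
        · calc mid < srt[m.toNat] := by rw [hget] at hc; exact hc
            _ ≤ srt[j] := hmono m.toNat j hmrange hj hjm'
      · simp only [hc, if_false]
        apply ih (m + 1) hi (by omega) (by omega) (by omega) hhn
        · intro j hj hmj
          rcases lt_or_ge (j : Int) lo with hjl | hjl
          · exact hlt j hj hjl
          · have hjm : j ≤ m.toNat := by omega
            have hle : srt[j] ≤ srt[m.toNat] := by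
              rcases Nat.eq_or_lt_of_le hjm with h' | h'
              · simp only [h']; exact le_refl _
              · exact hmono j m.toNat hj hmrange h'
            rw [hget] at hc; omega
        · exact hge
    · simp only [h, dif_neg, not_false_iff]
      have hlo : lo = hi := by omega
      refine ⟨lo.toNat, by omega, by omega, ?_, ?_⟩
      · intro j hj hjk; exact hlt j hj (by omega)
      · intro j hj hjk; exact hge j hj (by omega)

-- the elements greater than mid are exactly the suffix from the partition point
theorem filter_eq_drop (srt : List Int) (mid : Int) (k : Nat)
    (hk : k ≤ srt.length)
    (hle : ∀ (j : Nat) (hj : j < srt.length), j < k → srt[j] ≤ mid)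
    (hgt : ∀ (j : Nat) (hj : j < srt.length), k ≤ j → mid < srt[j]) :
    srt.filter (fun i => mid < i) = srt.drop k := by
  conv_lhs => rw [← List.take_append_drop k srt]
  rw [List.filter_append]
  have h1 : (srt.take k).filter (fun i => mid < i) = [] := by
    rw [List.filter_eq_nil_iff]
    intro a ha
    rcases List.mem_iff_getElem.mp ha with ⟨j, hj, rfl⟩
    have hjlen : j < srt.length := lt_of_lt_of_le (lt_of_lt_of_le hj (by simp)) (le_refl _)
    have hjk : j < k := by simp [List.length_take] at hj; omega
    simp only [List.getElem_take]
    simpa using not_lt.mpr (hle j hjlen hjk)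
  have h2 : (srt.drop k).filter (fun i => mid < i) = srt.drop k := by
    rw [List.filter_eq_self]
    intro a ha
    rcases List.mem_iff_getElem.mp ha with ⟨j, hj, rfl⟩
    have hjlen : k + j < srt.length := by simp [List.length_drop] at hj; omega
    simp only [List.getElem_drop]
    simpa using hgt (k + j) hjlen (by omega)
  rw [h1, h2, List.nil_append]

-- proof-side model of the prefix-sum list Source B builds
def ps (a : Int) : List Int → List Int
  | [] => []
  | v :: t => (a + v) :: ps (a + v) t

theorem prefAcc_foldl : ∀ (l : List Int) (p : List Int) (a : Int),
    l.foldl (fun st v => (st.1 ++ [st.2 + v], st.2 + v)) (p, a) = (p ++ ps a l, a + l.sum) := by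
  intro l
  induction l with
  | nil => intro p a; simp [ps]
  | cons v t ih => intro p a; simp [List.foldl, ps, ih]; ring

theorem length_ps : ∀ (l : List Int) (a : Int), (ps a l).length = l.length := by
  intro l; induction l with
  | nil => intro a; simp [ps]
  | cons v t ih => intro a; simp [ps, ih]

theorem getElem_ps : ∀ (l : List Int) (a : Int) (j : Nat) (hj : j < (ps a l).length),
    (ps a l)[j] = a + (l.take (j + 1)).sum := by
  intro l
  induction l with
  | nil => intro a j hj; simp [ps] at hj
  | cons v t ih =>
    intro a j hj
    cases j with
    | zero => simp [ps]
    | succ j =>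
      simp only [ps] at hj ⊢
      simp only [List.getElem_cons_succ]
      rw [ih (a + v) j (by simpa [ps] using hj)]
      simp [List.take_succ_cons]
      ring

-- value of the prefix list at an in-range index
theorem pref_getD (srt : List Int) (j : Nat) (hj : j ≤ srt.length) :
    PySem.List.pyGetD (prefAcc srt).1 (j : Int) 0 = (srt.take j).sum := by
  have hpref : (prefAcc srt).1 = 0 :: ps 0 srt := by
    unfold prefAcc; rw [prefAcc_foldl]; simp
  rw [hpref, PySem.List.pyGetD_natCast]
  have hlen : (0 :: ps 0 srt).length = srt.length + 1 := by simp [length_ps]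
  rw [List.getD_eq_getElem _ _ (by omega)]
  cases j with
  | zero => simp
  | succ j =>
    simp only [List.getElem_cons_succ]
    rw [getElem_ps srt 0 j (by rw [length_ps]; omega)]
    simp

-- A's inner fold = sum of (i - mid) over the elements greater than mid
theorem fold_total (mid : Int) : ∀ (l : List Int) (acc : Int),
    l.foldl (fun total i => if i > mid then total + (i - mid) else total) acc
      = acc + ((l.filter (fun i => mid < i)).map (fun i => i - mid)).sum := by
  intro l
  induction l with
  | nil => intro acc; simp
  | cons v t ih =>
    intro acc
    by_cases hv : mid < v
    · simp [List.foldl, List.filter, hv, ih, gt_iff_lt]; ring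
    · simp [List.foldl, List.filter, hv, ih, gt_iff_lt]

theorem sum_map_sub_const (mid : Int) : ∀ (l : List Int),
    (l.map (fun i => i - mid)).sum = l.sum - l.length * mid := by
  intro l; induction l with
  | nil => simp
  | cons v t ih => simp [ih]; ring

-- the per-midpoint totals of the two programs agree
theorem total_eq (array : List Int) (mid : Int) :
    array.foldl (fun total i => if i > mid then total + (i - mid) else total) 0
      = (PySem.List.pyGetD (prefAcc (PySem.List.sorted array (fun x => x) false)).1 (((PySem.List.sorted array (fun x => x) false).length : Int)) 0
          - PySem.List.pyGetD (prefAcc (PySem.List.sorted array (fun x => x) false)).1 (bsLoop (PySem.List.sorted array (fun x => x) false) mid 0 ((PySem.List.sorted array (fun x => x) false).length : Int)) 0)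
        - (((PySem.List.sorted array (fun x => x) false).length : Int) - bsLoop (PySem.List.sorted array (fun x => x) false) mid 0 ((PySem.List.sorted array (fun x => x) false).length : Int)) * mid := by
  set s := PySem.List.sorted array (fun x => x) false with hsdef
  have hs : s.Pairwise (· ≤ ·) := PySem.List.sorted_pairwise array (fun x => x)
  obtain ⟨k, hkeq, hkle, hle, hgt⟩ :=
    bsLoop_partition s mid hs ((s.length : Int) - 0).toNat 0 (s.length) (le_refl _)
      (le_refl _) (by positivity) (le_refl _)
      (by intro j hj hjl; omega)
      (by intro j hj hjl; omega)
  rw [fold_total, hkeq, pref_getD s s.length (le_refl _), pref_getD s k hkle]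
  have hperm : (s.filter (fun i => mid < i)).Perm (array.filter (fun i => mid < i)) :=
    (PySem.List.sorted_perm array (fun x => x) false).filter _
  rw [zero_add, ← ((hperm.map _).sum_eq :
        ((s.filter (fun i => mid < i)).map (fun i => i - mid)).sum
          = ((array.filter (fun i => mid < i)).map (fun i => i - mid)).sum)]
  rw [filter_eq_drop s mid k hkle hle hgt, sum_map_sub_const]
  have hsplit : (s.take k).sum + (s.drop k).sum = s.sum := by
    rw [← List.sum_append, List.take_append_drop]
  have htake : s.take s.length = s := List.take_length
  have hlen : (s.drop k).length = s.length - k := List.length_drop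
  rw [htake, hlen]
  have : ((s.length - k : Nat) : Int) = (s.length : Int) - (k : Int) := by omega
  rw [this]
  omega

-- the two outer loops run in lockstep
theorem loops_eq (array : List Int) (target : Int) :
    ∀ (fuel : Nat) (start end_ res : Int), (end_ - start + 1).toNat ≤ fuel →
    cutterLoop array target start end_ res
      = cutterAltLoop (PySem.List.sorted array (fun x => x) false)
          (prefAcc (PySem.List.sorted array (fun x => x) false)).1
          ((PySem.List.sorted array (fun x => x) false).length : Int) target start end_ res := by
  intro fuel
  induction fuel with
  | zero =>
    intro start end_ res hf
    have h : ¬ start ≤ end_ := by omega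
    rw [cutterLoop, cutterAltLoop]
    simp [h]
  | succ fuel ih =>
    intro start end_ res hf
    rw [cutterLoop, cutterAltLoop]
    by_cases h : start ≤ end_
    · simp only [h, dif_pos]
      have hb := PySem.Int.floordiv_two_mid_bounds (lo := start) (hi := end_) h
      rw [total_eq array (PySem.Int.floordiv (start + end_) 2)]
      split_ifs with h1 h2
      · rfl
      · exact ih start (PySem.Int.floordiv (start + end_) 2 - 1) res (by omega)
      · exact ih (PySem.Int.floordiv (start + end_) 2 + 1) end_ (PySem.Int.floordiv (start + end_) 2) (by omega)
    · simp [h]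

-- ===== VERDICT (by name: the statement is the Claim_ definition above) =====
theorem cutter_spec : Claim_equal_cutter := by
  intro array target start end_ _
  unfold Spec_cutter cutter cutter_alt
  exact loops_eq array target ((end_ - start + 1).toNat) start end_ 0 (le_refl _)
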